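-- pv_equiv track=rewrite | github.com/TotallyReal/mapping_field | field.py | batch_pow
-- ===== SOURCE A (Python) =====
-- import math
-- from typing import Union, List
--
-- def batch_pow(x, L: List[int]):
--     """
--     Compute simultanously several powers of the same number x.
--     """
--     max_power = max(L)
--     results = [1 for _ in L]
--     if (max_power == 0):
--         return results
--     n_bits = int(math.log2(max_power)) + 1
--     for i in range(n_bits):
--         mask = 1 << i
--         for j in range(len(L)):
--             if (L[j] & mask):
--                 results[j] *= x
--         x *= x
--     return results
-- ===== SOURCE B (Python) =====
-- def batch_pow(x, L):
--     """
--     Compute simultaneously several powers of the same number x.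
--     Loop over the elements, and for each one do square-and-multiply
--     over the n low bits of its exponent (n = bit width of the largest).
--     """
--     n = max(L).bit_length()
--     out = []
--     for p in L:
--         acc = 1
--         base = x
--         for _ in range(n):
--             if p & 1:
--                 acc = acc * base
--             base = base * base
--             p >>= 1
--         out.append(acc)
--     return out
-- ===== Notes on version B (the rewrite author's own statement) =====
-- stated objective: alternative
-- what changed: Loop interchange: instead of A's shared bit-outer loop that squares one running x and masks every element each round, B loops element-outer and runs a local square-and-multiply (local accumulator, local running square) over the shared bit width for each exponent; Pre_ excludes only the inputs where A raises ValueError (empty list, and lists whose maximum is negative, where math.log2 fails).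
import Mathlib
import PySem

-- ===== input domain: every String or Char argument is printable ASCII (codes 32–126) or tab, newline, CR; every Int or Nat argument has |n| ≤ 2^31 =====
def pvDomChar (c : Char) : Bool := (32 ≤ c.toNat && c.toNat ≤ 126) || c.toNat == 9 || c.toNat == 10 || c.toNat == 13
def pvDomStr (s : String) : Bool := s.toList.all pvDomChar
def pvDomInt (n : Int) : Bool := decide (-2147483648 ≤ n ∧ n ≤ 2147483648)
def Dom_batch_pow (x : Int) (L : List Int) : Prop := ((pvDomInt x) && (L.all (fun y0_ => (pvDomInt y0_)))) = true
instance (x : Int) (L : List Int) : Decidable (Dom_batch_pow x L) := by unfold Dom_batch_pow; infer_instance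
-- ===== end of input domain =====

-- B interchanges A's loops: element-outer with a local square-and-multiply per exponent
-- (local accumulator and local running square over the shared bit width) instead of A's
-- bit-outer loop squaring one shared x and masking every element each round.

-- ===== PORT A =====
-- One step of A's outer loop per bit i: results[j] *= x where L[j] & mask, then x *= x;
-- the inner 'for j in range(len(L))' updates results pointwise against L (zipWith).
def batch_pow (x : Int) (L : List Int) : List Int :=
  match PySem.List.max? L (fun y => y) with
  | none => []   -- max([]) raises ValueError; excluded by Pre_batch_pow
  | some maxPower =>
    let results := L.map (fun _ => (1 : Int))
    if maxPower = 0 then results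
    else
      -- n_bits = int(math.log2(max_power)) + 1; on Pre_ ∩ Dom (1 ≤ max_power ≤ 2^31)
      -- the double-precision log2 is exact, and this equals max_power.bit_length().
      -- (math.log2 raises ValueError for max_power < 0; excluded by Pre_batch_pow.)
      let nBits := PySem.Int.bitLength maxPower
      ((List.range nBits).foldl
        (fun (st : Int × List Int) i =>
          let mask : Int := 1 <<< i
          (st.1 * st.1,
           List.zipWith (fun lj rj => if PySem.Int.band lj mask ≠ 0 then rj * st.1 else rj) L st.2))
        (x, results)).2

-- ===== PORT B =====
-- inner 'for _ in range(n): if p & 1: acc = acc*base; base = base*base; p >>= 1'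
-- carried as a fold over range n with state (acc, base, p); p >> 1 is floordiv by 2
def bitStep (st : Int × Int × Int) (_ : Nat) : Int × Int × Int :=
  (if PySem.Int.band st.2.2 1 ≠ 0 then st.1 * st.2.1 else st.1,
   st.2.1 * st.2.1,
   PySem.Int.floordiv st.2.2 2)

def batch_pow_alt (x : Int) (L : List Int) : List Int :=
  match PySem.List.max? L (fun y => y) with
  | none => []   -- max([]) raises ValueError in B too; excluded by Pre_batch_pow
  | some m =>
    let n := PySem.Int.bitLength m   -- max(L).bit_length()
    L.map (fun p => ((List.range n).foldl bitStep (1, x, p)).1)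

-- ===== PRECONDITION & SPEC =====
-- Pre_ excludes exactly the inputs where A raises ValueError: the empty list (max([]))
-- and lists whose maximum is negative (math.log2 of a negative number).
def Pre_batch_pow (x : Int) (L : List Int) : Prop := ∃ a ∈ L, 0 ≤ a
instance (x : Int) (L : List Int) : Decidable (Pre_batch_pow x L) := by
  unfold Pre_batch_pow; infer_instance

def pvWitness_batch_pow : Int × List Int := (3, [5, 0, 2])

def Spec_batch_pow (x : Int) (L : List Int) (out : List Int) : Prop := out = batch_pow_alt x L
instance (x : Int) (L : List Int) (out : List Int) : Decidable (Spec_batch_pow x L out) := by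
  unfold Spec_batch_pow; infer_instance

-- ===== CLAIM (what is proved, stated in full; the proofs are below) =====
def Claim_equal_batch_pow : Prop :=
  ∀ (x : Int) (L : List Int), Dom_batch_pow x L → Pre_batch_pow x L →
    Spec_batch_pow x L (batch_pow x L)

-- ===== LEMMAS AND PROOFS =====

-- the exponent A's mask loop has applied to element p after the first n rounds
def eBits (p : Int) (n : Nat) : Nat := (PySem.Int.band p ((2 : Int) ^ n - 1)).toNat

theorem two_pow_sub_one_int (k : Nat) : ((2 : Int) ^ k - 1) = ((2 ^ k - 1 : Nat) : Int) := by
  have h : (1 : Nat) ≤ 2 ^ k := Nat.one_le_two_pow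
  push_cast [h]
  ring

theorem eBits_zero (p : Int) : eBits p 0 = 0 := by
  simp [eBits, PySem.Int.band_zero]

-- masking one more bit adds 2^n to the truncated exponent exactly when bit n of p is set
theorem eBits_succ (p : Int) (n : Nat) :
    eBits p (n + 1) =
      eBits p n + (if PySem.Int.band p (((1 <<< n : Nat) : Int)) ≠ 0 then 2 ^ n else 0) := by
  have hshift : (((1 <<< n : Nat) : Int)) = (((2 ^ n : Nat) : Int)) := by
    rw [Nat.shiftLeft_eq, one_mul]
  have hmod : ∀ M : Nat, M % 2 ^ (n + 1) = M % 2 ^ n + 2 ^ n * (M / 2 ^ n % 2) := by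
    intro M
    rw [pow_succ, Nat.mod_mul]
  by_cases hp : 0 ≤ p
  · -- p ≥ 0: everything happens on p.toNat
    set N := p.toNat with hN
    have hcastp : p = (N : Int) := by omega
    have hband : ∀ k : Nat, PySem.Int.band p ((2 : Int) ^ k - 1) = ((N &&& (2 ^ k - 1) : Nat) : Int) := by
      intro k
      rw [hcastp, two_pow_sub_one_int, PySem.Int.band_natCast]
    have hb : PySem.Int.band p (((1 <<< n : Nat) : Int)) = ((N &&& 2 ^ n : Nat) : Int) := by
      rw [hcastp, hshift, PySem.Int.band_natCast]
    simp only [eBits, hband, Int.toNat_natCast, Nat.and_two_pow_sub_one_eq_mod, hb]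
    rw [Nat.and_two_pow]
    have htb : N.testBit n = decide (N / 2 ^ n % 2 = 1) := Nat.testBit_eq_decide_div_mod_eq
    have h2 : N / 2 ^ n % 2 = 0 ∨ N / 2 ^ n % 2 = 1 := by omega
    rcases h2 with h2 | h2 <;> simp only [hmod, htb, h2] <;> simp
  · -- p < 0: two's complement, read off M = -p-1 = ~p
    set M := (-p - 1).toNat with hM
    have hband : ∀ k : Nat, PySem.Int.band p (((2 ^ k - 1 : Nat) : Int)) =
        (((2 ^ k - 1) - ((2 ^ k - 1) &&& M) : Nat) : Int) := by
      intro k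
      rw [PySem.Int.band.eq_1, if_neg hp, if_pos (by positivity)]
      simp only [Int.toNat_natCast, ← hM]
    have hbandpow : PySem.Int.band p (((2 ^ n : Nat) : Int)) =
        ((2 ^ n - (2 ^ n &&& M) : Nat) : Int) := by
      rw [PySem.Int.band.eq_1, if_neg hp, if_pos (by positivity)]
      simp only [Int.toNat_natCast, ← hM]
    have e1 : ∀ k : Nat, eBits p k = (2 ^ k - 1) - M % 2 ^ k := by
      intro k
      rw [eBits, two_pow_sub_one_int, hband, Int.toNat_natCast, Nat.and_comm,
        Nat.and_two_pow_sub_one_eq_mod]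
    have hpos : 0 < 2 ^ n := Nat.two_pow_pos n
    have hb : (PySem.Int.band p (((1 <<< n : Nat) : Int)) ≠ 0) ↔ M.testBit n = false := by
      rw [hshift, hbandpow, Nat.and_comm, Nat.and_two_pow]
      cases hbit : M.testBit n <;> simp
    rw [e1, e1]
    have htb : M.testBit n = decide (M / 2 ^ n % 2 = 1) := Nat.testBit_eq_decide_div_mod_eq
    have hlt : M % 2 ^ n < 2 ^ n := Nat.mod_lt _ hpos
    have hmn := hmod M
    have hps : (2 : Nat) ^ (n + 1) = 2 ^ n * 2 := by rw [pow_succ]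
    by_cases h2 : M / 2 ^ n % 2 = 1
    · rw [if_neg (fun hc => by simpa [htb, h2] using hb.mp hc)]
      rw [h2, mul_one] at hmn
      rw [hps] at hmn ⊢
      omega
    · have h2' : M / 2 ^ n % 2 = 0 := by omega
      rw [if_pos (hb.mpr (by simp [htb, h2]))]
      rw [h2', mul_zero, add_zero] at hmn
      rw [hps] at hmn ⊢
      omega

theorem zipWith_map_self {α β : Type} (f : α → β → β) (g : α → β) (L : List α) :
    List.zipWith f L (L.map g) = L.map (fun p => f p (g p)) := by
  induction L with
  | nil => rfl
  | cons a t ih => simp [ih]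

-- invariant of A's outer loop after n rounds: x has been squared n times and
-- results[j] = x ^ (the n low masked bits of L[j])
theorem A_loop (x : Int) (L : List Int) (n : Nat) :
    (List.range n).foldl
      (fun (st : Int × List Int) i =>
        let mask : Int := 1 <<< i
        (st.1 * st.1,
         List.zipWith (fun lj rj => if PySem.Int.band lj mask ≠ 0 then rj * st.1 else rj) L st.2))
      (x, L.map (fun _ => (1 : Int)))
    = (x ^ 2 ^ n, L.map (fun p => x ^ eBits p n)) := by
  induction n with
  | zero =>
    simp only [List.range_zero, List.foldl_nil, pow_zero, pow_one]
    congr 1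
    apply List.map_congr_left
    intro p _
    rw [eBits_zero, pow_zero]
  | succ n ih =>
    rw [List.range_succ, List.foldl_append, ih, List.foldl_cons, List.foldl_nil]
    simp only [Prod.mk.injEq]
    constructor
    · rw [← pow_add]
      congr 1
      rw [pow_succ]
      ring
    · rw [zipWith_map_self]
      apply List.map_congr_left
      intro p _
      rw [eBits_succ]
      split_ifs with h
      · rw [pow_add]
      · rw [add_zero]

-- p shifted right k times: p.toNat >> k for nonnegative p, two's complement for negative
def shiftVal (p : Int) (k : Nat) : Int :=
  if 0 ≤ p then ((p.toNat >>> k : Nat) : Int) else -(((-p - 1).toNat >>> k : Nat) : Int) - 1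

theorem shiftVal_zero (p : Int) : shiftVal p 0 = p := by
  unfold shiftVal
  split_ifs with h <;> simp <;> omega

-- one more 'p >>= 1'
theorem floordiv_shiftVal (p : Int) (k : Nat) :
    PySem.Int.floordiv (shiftVal p k) 2 = shiftVal p (k + 1) := by
  unfold shiftVal
  split_ifs with h
  · rw [Nat.shiftRight_succ, show ((2 : Int)) = ((2 : Nat) : Int) from rfl,
      PySem.Int.floordiv_natCast]
  · rw [PySem.Int.floordiv_eq_iff_of_pos (by omega)]
    set t := (-p - 1).toNat >>> k with ht
    rw [Nat.shiftRight_succ, ← ht]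
    have h2 : (t : Int) / 2 = ((t / 2 : Nat) : Int) := by
      exact_mod_cast rfl
    constructor <;> omega

-- bit 0 of p >> k is bit k of p (both signs)
theorem band_one_shiftVal (p : Int) (k : Nat) :
    (PySem.Int.band (shiftVal p k) 1 ≠ 0) ↔
      (PySem.Int.band p (((1 <<< k : Nat) : Int)) ≠ 0) := by
  have hshift : (((1 <<< k : Nat) : Int)) = (((2 ^ k : Nat) : Int)) := by
    rw [Nat.shiftLeft_eq, one_mul]
  rw [PySem.Int.band_one, PySem.Int.mod_eq_emod_of_pos (by omega)]
  unfold shiftVal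
  split_ifs with hp
  · -- p ≥ 0
    set N := p.toNat with hN
    have hcastp : p = (N : Int) := by omega
    have hb : PySem.Int.band p (((1 <<< k : Nat) : Int)) = ((N &&& 2 ^ k : Nat) : Int) := by
      rw [hcastp, hshift, PySem.Int.band_natCast]
    rw [hb, Nat.and_two_pow]
    have htb : N.testBit k = decide (N / 2 ^ k % 2 = 1) := Nat.testBit_eq_decide_div_mod_eq
    have hsr : N >>> k = N / 2 ^ k := Nat.shiftRight_eq_div_pow N k
    have hmod : ((N >>> k : Nat) : Int) % 2 = ((N >>> k % 2 : Nat) : Int) := by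
      exact_mod_cast rfl
    rw [hmod, hsr]
    have h2 : N / 2 ^ k % 2 = 0 ∨ N / 2 ^ k % 2 = 1 := by omega
    rcases h2 with h2 | h2 <;> simp [htb, h2]
  · -- p < 0: two's complement via M = -p-1
    set M := (-p - 1).toNat with hM
    have hbandpow : PySem.Int.band p (((2 ^ k : Nat) : Int)) =
        ((2 ^ k - (2 ^ k &&& M) : Nat) : Int) := by
      rw [PySem.Int.band.eq_1, if_neg hp, if_pos (by positivity)]
      simp only [Int.toNat_natCast, ← hM]
    have htb : M.testBit k = decide (M / 2 ^ k % 2 = 1) := Nat.testBit_eq_decide_div_mod_eq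
    have hsr : M >>> k = M / 2 ^ k := Nat.shiftRight_eq_div_pow M k
    have hpos : 0 < 2 ^ k := Nat.two_pow_pos k
    rw [hshift, hbandpow, Nat.and_comm, Nat.and_two_pow]
    set t := M / 2 ^ k with htq
    have hmodneg : (-((M >>> k : Nat) : Int) - 1) % 2 = 1 - ((t % 2 : Nat) : Int) := by
      rw [hsr]
      have : ((t : Nat) : Int) % 2 = ((t % 2 : Nat) : Int) := by exact_mod_cast rfl
      omega
    rw [hmodneg]
    have h2 : t % 2 = 0 ∨ t % 2 = 1 := by omega
    rcases h2 with h2 | h2 <;> simp [htb, h2] <;> omega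

-- invariant of B's inner loop after k rounds on exponent p: acc = x ^ (k low bits of p),
-- base has been squared k times, p has been shifted right k times
theorem B_loop (x p : Int) (k : Nat) :
    (List.range k).foldl bitStep (1, x, p) = (x ^ eBits p k, x ^ 2 ^ k, shiftVal p k) := by
  induction k with
  | zero =>
    simp only [List.range_zero, List.foldl_nil, pow_zero, pow_one, shiftVal_zero]
    rw [eBits_zero, pow_zero]
  | succ k ih =>
    rw [List.range_succ, List.foldl_append, ih, List.foldl_cons, List.foldl_nil]
    unfold bitStep
    simp only [Prod.mk.injEq]
    refine ⟨?_, ?_, floordiv_shiftVal p k⟩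
    · by_cases h : PySem.Int.band (shiftVal p k) 1 ≠ 0
      · rw [if_pos h, eBits_succ, if_pos ((band_one_shiftVal p k).mp h), pow_add]
      · rw [if_neg h, eBits_succ,
          if_neg (fun hc => h ((band_one_shiftVal p k).mpr hc)), add_zero]
    · rw [← pow_add]
      congr 1
      rw [pow_succ]
      ring

-- ===== VERDICT (by name: the statement is the Claim_ definition above) =====
theorem batch_pow_spec : Claim_equal_batch_pow := by
  intro x L _ hpre
  obtain ⟨a, haL, _⟩ := hpre
  unfold Spec_batch_pow batch_pow batch_pow_alt
  rcases hm : PySem.List.max? L (fun y => y) with _ | m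
  · exact absurd ((PySem.List.max?_eq_none_iff L (fun y => y)).mp hm) (by rintro rfl; cases haL)
  · simp only []
    by_cases hz : m = 0
    · subst hz
      rw [if_pos rfl]
      simp [PySem.Int.bitLength_zero]
    · rw [if_neg hz]
      simp only [A_loop]
      apply List.map_congr_left
      intro p _
      rw [B_loop]
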